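-- pv_equiv track=rewrite | github.com/GandharvJain/CSM-322-Coding-Theory-Projects | Project 2/A6_Syndrome.py | genCodewords
-- ===== SOURCE A (Python) =====
-- def genCodewords(codeword, indx, bits_left):
-- 	C = []
-- 	if bits_left > 0:
-- 		for i in range(indx, len(codeword)):
-- 			c = codeword.copy()
-- 			c[i] = 1
-- 			C += genCodewords(c, i + 1, bits_left - 1)
-- 	else:
-- 		C.append(codeword)
-- 	return C
-- ===== SOURCE B (Python) =====
-- def genCodewords(codeword, indx, bits_left):
--     if bits_left <= 0:
--         return [codeword]
--     n = len(codeword)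
--     if bits_left > n - indx:
--         return []
--     # DP table: table[j] = all j-subsets (increasing position lists, lex order)
--     # of the positions processed so far (a suffix of range(indx, n)).
--     table = [[[]]] + [[] for _ in range(bits_left)]
--     for p in reversed(range(indx, n)):
--         table = [[[p] + c for c in prev] + cur
--                  for prev, cur in zip([[]] + table, table)]
--     out = []
--     for ps in table[bits_left]:
--         c = codeword.copy()
--         for p in ps:
--             c[p] = 1
--         out.append(c)
--     return out
-- ===== Notes on version B (the rewrite author's own statement) =====
-- stated objective: alternative
-- what changed: Replaced A's branching recursion (copy the codeword, set a bit, recurse on the suffix) by an iterative dynamic-programming pass: a table of all j-subsets of positions is built right-to-left over range(indx, len), then each chosen position set is stamped onto one copy of the codeword; an explicit guard returns [] when bits_left exceeds the number of available positions.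
-- outside the precondition, e.g. on genCodewords([0, 0], -5, 1): A raises IndexError, B raises IndexError
import Mathlib
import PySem

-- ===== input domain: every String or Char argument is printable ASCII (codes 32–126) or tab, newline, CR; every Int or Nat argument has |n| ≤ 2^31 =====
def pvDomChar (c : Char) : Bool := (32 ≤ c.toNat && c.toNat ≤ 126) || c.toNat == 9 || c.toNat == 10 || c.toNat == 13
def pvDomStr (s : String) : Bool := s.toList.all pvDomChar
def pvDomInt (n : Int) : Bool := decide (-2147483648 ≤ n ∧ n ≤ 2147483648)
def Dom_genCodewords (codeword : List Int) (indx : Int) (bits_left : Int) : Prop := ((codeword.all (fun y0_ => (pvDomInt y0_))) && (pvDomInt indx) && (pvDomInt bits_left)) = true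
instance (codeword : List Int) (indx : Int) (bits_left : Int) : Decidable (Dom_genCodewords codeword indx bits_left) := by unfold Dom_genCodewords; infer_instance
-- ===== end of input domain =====

-- B replaces A's branching recursion by an iterative DP over positions (a table of
-- j-subsets built right-to-left), then stamps each position set onto one copy of the
-- codeword; objective: alternative (same asymptotic cost, different algorithm).

-- ===== PORT A =====
def genCodewords (codeword : List Int) (indx : Int) (bits_left : Int) : List (List Int) :=
  if _h : bits_left > 0 then
    (PySem.List.pyRange indx (codeword.length : Int) 1).foldl
      (fun C i => C ++ genCodewords (PySem.List.pySetD codeword i 1) (i + 1) (bits_left - 1)) []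
  else [codeword]
termination_by bits_left.toNat
decreasing_by omega

-- ===== PORT B =====
-- one DP step: new table[j] = [[p]+c for c in table[j-1]] + table[j]  (table[-1] read as [])
def stepTable (p : Int) (t : List (List (List Int))) : List (List (List Int)) :=
  List.zipWith (fun prev cur => prev.map (fun c => p :: c) ++ cur) ([] :: t) t

def genCodewords_alt (codeword : List Int) (indx : Int) (bits_left : Int) : List (List Int) :=
  if bits_left ≤ 0 then [codeword]
  else
    let n : Int := codeword.length
    if bits_left > n - indx then []
    else
      let table0 : List (List (List Int)) := [[]] :: List.replicate bits_left.toNat []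
      let table := ((PySem.List.pyRange indx n 1).reverse).foldl (fun t p => stepTable p t) table0
      -- table[bits_left]: always in range (table keeps length bits_left+1)
      (PySem.List.pyGetD table bits_left []).map
        (fun ps => ps.foldl (fun c p => PySem.List.pySetD c p 1) codeword)

-- ===== PRECONDITION & SPEC =====
-- Pre_ excludes exactly the inputs on which Python A raises IndexError: bits_left > 0
-- with indx < -len(codeword), where the very first assignment c[indx] = 1 is out of range.
def Pre_genCodewords (codeword : List Int) (indx : Int) (bits_left : Int) : Prop :=
  bits_left ≤ 0 ∨ -(codeword.length : Int) ≤ indx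
instance (codeword : List Int) (indx : Int) (bits_left : Int) : Decidable (Pre_genCodewords codeword indx bits_left) := by unfold Pre_genCodewords; infer_instance
def pvWitness_genCodewords : List Int × Int × Int := ([0, 0, 0, 0], 1, 2)

def Spec_genCodewords (codeword : List Int) (indx : Int) (bits_left : Int) (out : List (List Int)) : Prop := out = genCodewords_alt codeword indx bits_left
instance (codeword : List Int) (indx : Int) (bits_left : Int) (out : List (List Int)) : Decidable (Spec_genCodewords codeword indx bits_left out) := by unfold Spec_genCodewords; infer_instance

-- ===== CLAIM (what is proved, stated in full; the proofs are below) =====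
def Claim_equal_genCodewords : Prop := ∀ (codeword : List Int) (indx : Int) (bits_left : Int), Dom_genCodewords codeword indx bits_left → Pre_genCodewords codeword indx bits_left → Spec_genCodewords codeword indx bits_left (genCodewords codeword indx bits_left)

-- ===== LEMMAS AND PROOFS =====

-- all size-(b) increasing position lists drawn from [q, n), in the lexicographic
-- order both programs produce
def posCombs (n : Int) : Int → Nat → List (List Int)
  | _, 0 => [[]]
  | q, b + 1 =>
      (PySem.List.pyRange q n 1).flatMap (fun i => (posCombs n (i + 1) b).map (fun ps => i :: ps))

def applySets (codeword : List Int) (ps : List Int) : List Int :=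
  ps.foldl (fun c p => PySem.List.pySetD c p 1) codeword

theorem posCombs_nil (n q : Int) (b : Nat) (hq : n ≤ q) : posCombs n q (b + 1) = [] := by
  simp only [posCombs]
  rw [PySem.List.pyRange_one_eq_nil hq]
  rfl

theorem posCombs_split (n p : Int) (b : Nat) (hp : p < n) :
    posCombs n p (b + 1) =
      (posCombs n (p + 1) b).map (fun ps => p :: ps) ++ posCombs n (p + 1) (b + 1) := by
  conv_lhs => rw [posCombs]
  rw [PySem.List.pyRange_one_cons hp, List.flatMap_cons]
  conv_rhs => rw [posCombs]

theorem posCombs_nil_of_big (n : Int) : ∀ (b : Nat) (q : Int), 1 ≤ b → (b : Int) > n - q →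
    posCombs n q b = [] := by
  intro b
  induction b with
  | zero => intro q h; omega
  | succ b ih =>
      intro q _ hbig
      by_cases hq : n ≤ q
      · exact posCombs_nil n q b hq
      · simp only [posCombs]
        rw [List.flatMap_eq_nil_iff]
        intro i hi
        rw [PySem.List.mem_pyRange_one] at hi
        rw [ih (i + 1) (by omega) (by omega)]
        rfl

-- A computes applySets over posCombs
theorem genCodewords_eq_posCombs (m : Nat) : ∀ (c : List Int) (q : Int),
    genCodewords c q ((m : Int) + 1) = (posCombs (c.length) q (m + 1)).map (applySets c) := by
  induction m with
  | zero =>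
      intro c q
      rw [genCodewords, dif_pos (by norm_num), PySem.List.foldl_append_eq_flatMap,
        List.nil_append]
      simp only [posCombs, List.map_flatMap]
      congr 1
      funext i
      rw [genCodewords]
      norm_num
      simp [applySets]
  | succ m ih =>
      intro c q
      have hc : ((((m : Nat) + 1 : Nat)) : Int) = (m : Int) + 1 := by push_cast; ring
      rw [hc, genCodewords, dif_pos (by omega), PySem.List.foldl_append_eq_flatMap,
        List.nil_append]
      conv_rhs => rw [posCombs]
      rw [List.map_flatMap]
      congr 1
      funext i
      have he : (m : Int) + 1 + 1 - 1 = (m : Int) + 1 := by ring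
      rw [he, ih (PySem.List.pySetD c i 1) (i + 1), PySem.List.length_pySetD, List.map_map]
      rfl

-- B's table spec
def tspec (n q : Int) (k : Nat) : List (List (List Int)) :=
  (List.range (k + 1)).map (fun j => posCombs n q j)

theorem tspec_init (n : Int) (k : Nat) : tspec n n k = [[]] :: List.replicate k [] := by
  induction k with
  | zero => rfl
  | succ k ih =>
      simp only [tspec] at ih ⊢
      rw [List.range_succ, List.map_append, ih, List.replicate_succ']
      simp [posCombs_nil n n k le_rfl]

theorem stepTable_tspec (n p : Int) (k : Nat) (hp : p < n) :
    stepTable p (tspec n (p + 1) k) = tspec n p k := by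
  apply List.ext_getElem
  · simp [stepTable, tspec]
  · intro j h1 h2
    simp only [stepTable]
    rw [List.getElem_zipWith]
    cases j with
    | zero => simp [tspec, posCombs]
    | succ i =>
        have hlen : i + 1 < (tspec n (p + 1) k).length := by
          simp only [stepTable, List.length_zipWith, List.length_cons] at h1
          omega
        have hi : i + 1 < k + 1 := by simpa [tspec] using hlen
        simp only [List.getElem_cons_succ, tspec, List.getElem_map, List.getElem_range]
        exact (posCombs_split n p i hp).symm

theorem foldr_stepTable (n : Int) (k : Nat) : ∀ (m : Nat) (q : Int),
    (n - q).toNat = m → q ≤ n →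
    (PySem.List.pyRange q n 1).foldr (fun p t => stepTable p t) (tspec n n k) = tspec n q k := by
  intro m
  induction m with
  | zero =>
      intro q hm hq
      have : q = n := by omega
      subst this
      rw [PySem.List.pyRange_one_eq_nil le_rfl]
      rfl
  | succ m ih =>
      intro q hm hq
      have hq' : q < n := by omega
      rw [PySem.List.pyRange_one_cons hq', List.foldr_cons, ih (q + 1) (by omega) (by omega),
        stepTable_tspec n q k hq']

-- ===== VERDICT (by name: the statement is the Claim_ definition above) =====
theorem genCodewords_spec : Claim_equal_genCodewords := by
  intro c q bl _dom _pre
  unfold Spec_genCodewords genCodewords_alt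
  by_cases hbl : bl ≤ 0
  · rw [if_pos hbl, genCodewords, dif_neg (by omega)]
  · rw [if_neg hbl]
    have hk : bl = ((bl.toNat - 1 : Nat) : Int) + 1 := by omega
    have hA : genCodewords c q bl = (posCombs (c.length) q bl.toNat).map (applySets c) := by
      conv_lhs => rw [hk]
      rw [genCodewords_eq_posCombs (bl.toNat - 1) c q]
      congr 2
      omega
    by_cases hbig : bl > (c.length : Int) - q
    · rw [if_pos hbig, hA, posCombs_nil_of_big (c.length) bl.toNat q (by omega) (by omega)]
      rfl
    · rw [if_neg hbig, hA]
      dsimp only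
      have hqn : q ≤ (c.length : Int) := by omega
      rw [List.foldl_reverse]
      have hinit : ([[]] :: List.replicate bl.toNat ([] : List (List Int)))
          = tspec (c.length) (c.length) bl.toNat := (tspec_init _ _).symm
      rw [hinit, foldr_stepTable (c.length) bl.toNat ((c.length : Int) - q).toNat q rfl hqn]
      have hblk : bl = (bl.toNat : Int) := by omega
      rw [hblk, PySem.List.pyGetD_natCast,
        List.getD_eq_getElem _ _ (by simp [tspec])]
      simp only [tspec, List.getElem_map, List.getElem_range]
      rfl
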